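-- pv_equiv track=rewrite | github.com/Hanseok0505/search_hybrid | app/services/hybrid_search_service.py | _normalize_backends
-- ===== SOURCE A (Python) =====
-- def _normalize_backends(requested: list[str] | None) -> list[str]:
--     requested_set = [
--         (item or "").strip().lower()
--         for item in (requested or [])
--         if isinstance(item, str)
--     ]
--     selected = [item for item in requested_set if item in {"elastic", "vector", "graph", "local"}]
--     return sorted(set(selected)) or ["elastic", "vector", "graph", "local"]
-- ===== SOURCE B (Python) =====
-- _UNIVERSE = ("elastic", "graph", "local", "vector")  # the known backends, pre-sorted
-- _DEFAULT = ["elastic", "vector", "graph", "local"]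
--
-- def _normalize_backends(requested):
--     s = {(item or "").strip().lower() for item in (requested or []) if isinstance(item, str)}
--     chosen = [name for name in _UNIVERSE if name in s]
--     return chosen if chosen else list(_DEFAULT)
-- ===== Notes on version B (the rewrite author's own statement) =====
-- stated objective: idiomatic
-- what changed: B builds a set of normalized tokens once and enumerates the fixed pre-sorted backend universe, so the filter-then-sort-then-dedup of A disappears (no sort call at all).
import Mathlib
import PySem

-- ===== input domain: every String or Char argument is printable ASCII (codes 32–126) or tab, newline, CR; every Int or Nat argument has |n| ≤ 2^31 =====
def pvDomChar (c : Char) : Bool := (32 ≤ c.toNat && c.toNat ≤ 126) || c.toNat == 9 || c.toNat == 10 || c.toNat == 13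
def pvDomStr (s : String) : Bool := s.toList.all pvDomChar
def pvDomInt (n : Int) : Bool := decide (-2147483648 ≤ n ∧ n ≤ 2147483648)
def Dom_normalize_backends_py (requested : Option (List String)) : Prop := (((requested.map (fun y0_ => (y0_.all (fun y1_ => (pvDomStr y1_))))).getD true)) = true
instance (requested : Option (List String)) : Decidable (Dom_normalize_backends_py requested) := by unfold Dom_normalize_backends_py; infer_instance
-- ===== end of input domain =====

-- B enumerates the fixed pre-sorted backend universe against a set of normalized input
-- tokens instead of filter+sort+dedup of the input (idiomatic; same cost, no sort call).

-- ===== PORT A =====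
def normalize_backends_py (requested : Option (List String)) : List String :=
  let requested_set := (requested.getD []).map
    (fun item => PySem.Str.lower (PySem.Str.strip item))
  let selected := requested_set.filter (fun item =>
    item == "elastic" || item == "vector" || item == "graph" || item == "local")
  let s := PySem.List.sorted (PySem.Set.ofList selected) (fun x => x) false
  if s.isEmpty then ["elastic", "vector", "graph", "local"] else s

-- ===== PORT B =====
def normalize_backends_py_alt (requested : Option (List String)) : List String :=
  let s := PySem.Set.ofList ((requested.getD []).map
    (fun item => PySem.Str.lower (PySem.Str.strip item)))
  let chosen := ["elastic", "graph", "local", "vector"].filter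
    (fun name => PySem.Set.contains s name)
  if chosen.isEmpty then ["elastic", "vector", "graph", "local"] else chosen

-- ===== PRECONDITION & SPEC =====
def Spec_normalize_backends_py (requested : Option (List String)) (out : List String) : Prop := out = normalize_backends_py_alt requested
instance (requested : Option (List String)) (out : List String) : Decidable (Spec_normalize_backends_py requested out) := by unfold Spec_normalize_backends_py; infer_instance

-- ===== CLAIM (what is proved, stated in full; the proofs are below) =====
def Claim_equal_normalize_backends_py : Prop := ∀ (requested : Option (List String)), Dom_normalize_backends_py requested → Spec_normalize_backends_py requested (normalize_backends_py requested)

-- ===== LEMMAS AND PROOFS =====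

-- sorted(set(filter-to-universe norm)) equals the fixed sorted universe filtered by membership in set(norm)
lemma sorted_selected_eq_filtered_universe (norm : List String) :
    PySem.List.sorted (PySem.Set.ofList (norm.filter (fun item =>
      item == "elastic" || item == "vector" || item == "graph" || item == "local"))) (fun x => x) false
    = (["elastic", "graph", "local", "vector"]).filter
        (fun name => PySem.Set.contains (PySem.Set.ofList norm) name) := by
  apply PySem.List.sorted_eq_of_perm_of_pairwise_lt
  · rw [List.perm_ext_iff_of_nodup (List.Nodup.filter _ (by decide))
        (PySem.Set.nodup_ofList _)]
    intro a
    simp only [PySem.Set.mem_ofList, List.mem_filter, PySem.Set.contains_eq_listContains,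
      List.contains_iff_mem, List.mem_cons, List.not_mem_nil, or_false,
      Bool.or_eq_true, beq_iff_eq]
    tauto
  · exact List.Pairwise.filter _ (by simp [String.lt_iff_toList_lt]; decide)

-- ===== VERDICT (by name: the statement is the Claim_ definition above) =====
theorem normalize_backends_py_spec : Claim_equal_normalize_backends_py := by
  intro requested _
  unfold Spec_normalize_backends_py normalize_backends_py normalize_backends_py_alt
  simp only
  rw [sorted_selected_eq_filtered_universe]
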